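-- pv_equiv track=rewrite | github.com/jungle335/astar | main.py | costTurnare1
-- ===== SOURCE A (Python) =====
-- def costTurnare1(vas1, vas2, capFinala):
--     """
--     Daca vas2 are culoare (len(vas2) == 3), se verifica daca se poate turna apa din primul vas in acesta astfel incat sa
--     nu depaseasca cantitatea de lichid din starea finala. Daca vas2 nu are culoare, se verifica daca se poate turna apa
--     din vas 1 astfel incat acesta sa ramana cu cantitatea de lichid din starea finala.
--
--     Parameters
--     ----------
--     vas1 : list
--     vas2 : list
--     capFinala : int
--
--     Returns
--     -------
--     cost : int
--         cantitatea de lichid turnat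
--     """
--     lichid1, cap2, lichid2, cost = vas1[1], vas2[0], vas2[1], 0
--     capRamas = cap2 - lichid2
--     if len(vas2) == 3:
--         while lichid1 > 0 and capRamas > 0 and lichid2 < capFinala:
--             lichid1, lichid2, capRamas, cost = lichid1 - 1, lichid2 + 1, capRamas - 1, cost + 1
--     else:
--         while lichid1 > 0 and capRamas > 0 and lichid1 > capFinala:
--             lichid1, lichid2, capRamas = lichid1 - 1, lichid2 + 1, capRamas - 1
--         return lichid2 if lichid1 == capFinala else 0
--
--     return cost
-- ===== SOURCE B (Python) =====
-- def costTurnare1(vas1, vas2, capFinala):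
--     lichid1, cap2, lichid2 = vas1[1], vas2[0], vas2[1]
--     capRamas = cap2 - lichid2
--     if len(vas2) == 3:
--         return max(0, min(lichid1, capRamas, capFinala - lichid2))
--     k = max(0, min(lichid1, capRamas, lichid1 - capFinala))
--     return lichid2 + k if lichid1 - k == capFinala else 0
-- ===== Notes on version B (the rewrite author's own statement) =====
-- stated objective: alternative
-- what changed: Replaced both unit-by-unit pouring while-loops with a closed-form clamped minimum of the loop bounds (iteration count = max(0, min of the three limiting quantities)).
import Mathlib
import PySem

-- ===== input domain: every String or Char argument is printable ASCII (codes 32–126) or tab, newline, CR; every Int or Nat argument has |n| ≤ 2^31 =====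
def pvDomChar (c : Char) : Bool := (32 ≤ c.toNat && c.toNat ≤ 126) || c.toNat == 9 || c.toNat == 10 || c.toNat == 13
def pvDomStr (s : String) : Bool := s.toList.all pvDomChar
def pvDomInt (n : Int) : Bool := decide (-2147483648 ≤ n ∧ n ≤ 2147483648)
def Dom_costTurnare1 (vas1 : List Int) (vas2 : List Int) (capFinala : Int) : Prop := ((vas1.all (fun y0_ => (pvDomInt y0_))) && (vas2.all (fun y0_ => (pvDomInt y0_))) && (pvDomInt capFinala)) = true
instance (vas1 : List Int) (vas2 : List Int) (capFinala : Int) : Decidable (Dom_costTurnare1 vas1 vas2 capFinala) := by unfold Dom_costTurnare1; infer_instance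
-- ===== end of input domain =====

-- B replaces A's unit-by-unit pouring loops with a closed-form clamped minimum of the loop bounds.

-- ===== PORT A =====
-- the first while loop: state (lichid1, lichid2, capRamas, cost); lichid1 strictly decreases while positive
def pvLoopA1 (lichid1 lichid2 capRamas cost capFinala : Int) : Int :=
  if lichid1 > 0 ∧ capRamas > 0 ∧ lichid2 < capFinala then
    pvLoopA1 (lichid1 - 1) (lichid2 + 1) (capRamas - 1) (cost + 1) capFinala
  else cost
termination_by lichid1.toNat
decreasing_by omega

-- the second while loop: returns the final (lichid1, lichid2)
def pvLoopA2 (lichid1 lichid2 capRamas capFinala : Int) : Int × Int :=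
  if lichid1 > 0 ∧ capRamas > 0 ∧ lichid1 > capFinala then
    pvLoopA2 (lichid1 - 1) (lichid2 + 1) (capRamas - 1) capFinala
  else (lichid1, lichid2)
termination_by lichid1.toNat
decreasing_by omega

def costTurnare1 (vas1 : List Int) (vas2 : List Int) (capFinala : Int) : Int :=
  let lichid1 := (PySem.List.pyGet? vas1 1).getD 0   -- vas1[1]; in range under Pre_
  let cap2 := (PySem.List.pyGet? vas2 0).getD 0      -- vas2[0]
  let lichid2 := (PySem.List.pyGet? vas2 1).getD 0   -- vas2[1]
  let cost : Int := 0
  let capRamas := cap2 - lichid2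
  if vas2.length = 3 then
    pvLoopA1 lichid1 lichid2 capRamas cost capFinala
  else
    let r := pvLoopA2 lichid1 lichid2 capRamas capFinala
    if r.1 = capFinala then r.2 else 0

-- ===== PORT B =====
def costTurnare1_alt (vas1 : List Int) (vas2 : List Int) (capFinala : Int) : Int :=
  let lichid1 := (PySem.List.pyGet? vas1 1).getD 0
  let cap2 := (PySem.List.pyGet? vas2 0).getD 0
  let lichid2 := (PySem.List.pyGet? vas2 1).getD 0
  let capRamas := cap2 - lichid2
  if vas2.length = 3 then
    max 0 (min lichid1 (min capRamas (capFinala - lichid2)))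
  else
    let k := max 0 (min lichid1 (min capRamas (lichid1 - capFinala)))
    if lichid1 - k = capFinala then lichid2 + k else 0

-- ===== PRECONDITION & SPEC =====
-- Pre_ excludes exactly the inputs where A raises IndexError (vas1[1], vas2[0] or vas2[1] missing)
def Pre_costTurnare1 (vas1 : List Int) (vas2 : List Int) (capFinala : Int) : Prop :=
  2 ≤ vas1.length ∧ 2 ≤ vas2.length
instance (vas1 : List Int) (vas2 : List Int) (capFinala : Int) : Decidable (Pre_costTurnare1 vas1 vas2 capFinala) := by unfold Pre_costTurnare1; infer_instance

def pvWitness_costTurnare1 : List Int × List Int × Int := ([2, 5], [7, 3, 1], 6)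

def Spec_costTurnare1 (vas1 : List Int) (vas2 : List Int) (capFinala : Int) (out : Int) : Prop := out = costTurnare1_alt vas1 vas2 capFinala
instance (vas1 : List Int) (vas2 : List Int) (capFinala : Int) (out : Int) : Decidable (Spec_costTurnare1 vas1 vas2 capFinala out) := by unfold Spec_costTurnare1; infer_instance

-- ===== CLAIM (what is proved, stated in full; the proofs are below) =====
def Claim_equal_costTurnare1 : Prop := ∀ (vas1 : List Int) (vas2 : List Int) (capFinala : Int), Dom_costTurnare1 vas1 vas2 capFinala → Pre_costTurnare1 vas1 vas2 capFinala → Spec_costTurnare1 vas1 vas2 capFinala (costTurnare1 vas1 vas2 capFinala)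

-- ===== LEMMAS AND PROOFS =====

theorem pvLoopA1_closed (lichid1 lichid2 capRamas cost capFinala : Int) :
    pvLoopA1 lichid1 lichid2 capRamas cost capFinala
      = cost + max 0 (min lichid1 (min capRamas (capFinala - lichid2))) := by
  fun_induction pvLoopA1 with
  | case1 l1 l2 cr c h ih => rw [ih]; omega
  | case2 l1 l2 cr c h => omega

theorem pvLoopA2_closed (lichid1 lichid2 capRamas capFinala : Int) :
    pvLoopA2 lichid1 lichid2 capRamas capFinala
      = (lichid1 - max 0 (min lichid1 (min capRamas (lichid1 - capFinala))),
         lichid2 + max 0 (min lichid1 (min capRamas (lichid1 - capFinala)))) := by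
  fun_induction pvLoopA2 with
  | case1 l1 l2 cr h ih =>
      rw [ih]
      refine Prod.ext ?_ ?_ <;> simp <;> omega
  | case2 l1 l2 cr h =>
      refine Prod.ext ?_ ?_ <;> simp <;> omega

-- ===== VERDICT (by name: the statement is the Claim_ definition above) =====
theorem costTurnare1_spec : Claim_equal_costTurnare1 := by
  intro vas1 vas2 capFinala _ _
  unfold Spec_costTurnare1 costTurnare1 costTurnare1_alt
  simp only []
  split
  · rw [pvLoopA1_closed]; omega
  · rw [pvLoopA2_closed]
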